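-- pv_equiv track=rewrite | github.com/e8johan/adventofcode2019 | 1/1.py | fuel_for_mass_b
-- ===== SOURCE A (Python) =====
-- def fuel_for_mass_a(mass):
--     return (mass//3)-2
--
-- def fuel_for_mass_b(fuel):
--     res = 0
--     ff = fuel
--     while True:
--         ff = fuel_for_mass_a(ff)
--         if ff > 0:
--             res += ff
--         else:
--             return res
-- ===== SOURCE B (Python) =====
-- def fuel_for_mass_b(fuel):
--     f = fuel // 3 - 2
--     return 0 if f <= 0 else f + fuel_for_mass_b(f)
-- ===== Notes on version B (the rewrite author's own statement) =====
-- stated objective: simpler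
-- what changed: Replaced the infinite while-loop with an explicit accumulator by direct recursion on the fuel recurrence (f + fuel_for_mass_b(f)), with no helper function and no mutable state.
import Mathlib
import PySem

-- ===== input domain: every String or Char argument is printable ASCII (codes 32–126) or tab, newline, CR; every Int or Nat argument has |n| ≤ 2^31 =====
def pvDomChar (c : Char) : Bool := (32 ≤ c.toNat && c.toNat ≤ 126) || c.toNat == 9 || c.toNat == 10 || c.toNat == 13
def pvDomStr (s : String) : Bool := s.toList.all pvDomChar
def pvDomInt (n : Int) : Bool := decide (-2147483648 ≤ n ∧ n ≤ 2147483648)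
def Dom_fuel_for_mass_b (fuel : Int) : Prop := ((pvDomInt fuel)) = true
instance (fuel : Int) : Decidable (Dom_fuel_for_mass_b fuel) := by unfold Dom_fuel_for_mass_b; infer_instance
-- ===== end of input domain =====

-- Header: B replaces A's accumulator while-loop by direct recursion on the fuel recurrence (simpler decomposition, same cost).


-- ===== PORT A =====
def fuel_for_mass_a (mass : Int) : Int := PySem.Int.floordiv mass 3 - 2

-- the 'while True' loop of A: state (ff, res); terminates because ff strictly shrinks while positive
def fuel_for_mass_b_loop (ff res : Int) : Int :=
  if fuel_for_mass_a ff > 0 then fuel_for_mass_b_loop (fuel_for_mass_a ff) (res + fuel_for_mass_a ff)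
  else res
termination_by ff.toNat
decreasing_by
  have h3 : PySem.Int.floordiv ff 3 = ff / 3 := PySem.Int.floordiv_eq_ediv_of_pos (by omega)
  simp only [fuel_for_mass_a, h3] at *
  omega

def fuel_for_mass_b (fuel : Int) : Int := fuel_for_mass_b_loop fuel 0

-- ===== PORT B =====
def fuel_for_mass_b_alt (fuel : Int) : Int :=
  if PySem.Int.floordiv fuel 3 - 2 ≤ 0 then 0
  else (PySem.Int.floordiv fuel 3 - 2) + fuel_for_mass_b_alt (PySem.Int.floordiv fuel 3 - 2)
termination_by fuel.toNat
decreasing_by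
  have h3 : PySem.Int.floordiv fuel 3 = fuel / 3 := PySem.Int.floordiv_eq_ediv_of_pos (by omega)
  simp only [h3] at *
  omega

-- ===== PRECONDITION & SPEC =====
def Spec_fuel_for_mass_b (fuel : Int) (out : Int) : Prop := out = fuel_for_mass_b_alt fuel
instance (fuel : Int) (out : Int) : Decidable (Spec_fuel_for_mass_b fuel out) := by unfold Spec_fuel_for_mass_b; infer_instance

-- ===== CLAIM (what is proved, stated in full; the proofs are below) =====
def Claim_equal_fuel_for_mass_b : Prop := ∀ (fuel : Int), Dom_fuel_for_mass_b fuel → Spec_fuel_for_mass_b fuel (fuel_for_mass_b fuel)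

-- ===== LEMMAS AND PROOFS =====
theorem fuel_loop_eq_alt (ff res : Int) :
    fuel_for_mass_b_loop ff res = res + fuel_for_mass_b_alt ff := by
  fun_induction fuel_for_mass_b_loop ff res with
  | case1 ff res hpos ih =>
    rw [ih]
    conv_rhs => rw [fuel_for_mass_b_alt]
    simp only [fuel_for_mass_a] at hpos ⊢
    rw [if_neg (by omega)]
    ring
  | case2 ff res hnpos =>
    conv_rhs => rw [fuel_for_mass_b_alt]
    simp only [fuel_for_mass_a] at hnpos
    rw [if_pos (by omega)]
    ring

-- ===== VERDICT (by name: the statement is the Claim_ definition above) =====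
theorem fuel_for_mass_b_spec : Claim_equal_fuel_for_mass_b := by
  intro fuel _
  unfold Spec_fuel_for_mass_b fuel_for_mass_b
  rw [fuel_loop_eq_alt]
  ring
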